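-- pv_equiv track=rewrite | github.com/nickbrigden83/Aoc2024 | day1.py | get_total_of_similarity
-- ===== SOURCE A (Python) =====
-- def get_total_of_similarity(list_of_numbers: list[int], number_counts: dict[int, int]) -> int:
--     total_similarity = 0
--     for number in list_of_numbers:
--         try:
--             total_similarity += number * number_counts[number]
--         except KeyError:
--             continue
--     return total_similarity
-- ===== SOURCE B (Python) =====
-- def get_total_of_similarity(list_of_numbers: list[int], number_counts: dict[int, int]) -> int:
--     freq = {}
--     for n in list_of_numbers:
--         freq[n] = freq.get(n, 0) + 1
--     total = 0
--     for value, occurrences in freq.items():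
--         total += value * occurrences * number_counts.get(value, 0)
--     return total
-- ===== Notes on version B (the rewrite author's own statement) =====
-- stated objective: alternative
-- what changed: B first aggregates the list into a frequency table (value -> occurrences) and then makes one pass over the distinct values, adding value*occurrences*count per key, instead of A's per-element pass with try/except KeyError.
import Mathlib
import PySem

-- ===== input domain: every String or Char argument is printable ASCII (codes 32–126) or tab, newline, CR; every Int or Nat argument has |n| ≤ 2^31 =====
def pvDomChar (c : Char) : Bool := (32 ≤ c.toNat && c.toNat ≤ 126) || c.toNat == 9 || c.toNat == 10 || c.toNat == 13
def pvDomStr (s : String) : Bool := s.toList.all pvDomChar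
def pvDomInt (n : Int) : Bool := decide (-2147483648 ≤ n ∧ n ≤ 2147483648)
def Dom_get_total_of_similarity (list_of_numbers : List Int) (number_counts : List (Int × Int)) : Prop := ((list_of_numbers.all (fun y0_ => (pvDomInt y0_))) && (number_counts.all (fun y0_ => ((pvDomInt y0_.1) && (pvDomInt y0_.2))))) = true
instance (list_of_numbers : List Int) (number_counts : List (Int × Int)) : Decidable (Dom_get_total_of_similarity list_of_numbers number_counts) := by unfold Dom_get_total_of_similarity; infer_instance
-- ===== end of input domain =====

-- B aggregates the list into a frequency table first, then sums value*occurrences*count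
-- over the distinct values (one pass per distinct key); alternative decomposition, same result.

-- ===== PORT A =====
-- per-element loop; `try: ... except KeyError: continue` = add only when get? finds the key
def get_total_of_similarity (list_of_numbers : List Int) (number_counts : List (Int × Int)) : Int :=
  list_of_numbers.foldl
    (fun total_similarity number =>
      match (PySem.Dict.ofList number_counts).get? number with
      | some c => total_similarity + number * c
      | none => total_similarity)
    0

-- ===== PORT B =====
-- freq-table build: freq[n] = freq.get(n, 0) + 1 over the list
def pvFreq (list_of_numbers : List Int) : PySem.Dict Int Int :=
  list_of_numbers.foldl
    (fun d n => d.insert n (d.getD n 0 + 1)) (PySem.Dict.empty : PySem.Dict Int Int)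

def get_total_of_similarity_alt (list_of_numbers : List Int) (number_counts : List (Int × Int)) : Int :=
  (pvFreq list_of_numbers).items.foldl
    (fun total p =>
      total + p.1 * p.2 * (PySem.Dict.ofList number_counts).getD p.1 0)
    0

-- ===== PRECONDITION & SPEC =====
def Spec_get_total_of_similarity (list_of_numbers : List Int) (number_counts : List (Int × Int)) (out : Int) : Prop := out = get_total_of_similarity_alt list_of_numbers number_counts
instance (list_of_numbers : List Int) (number_counts : List (Int × Int)) (out : Int) : Decidable (Spec_get_total_of_similarity list_of_numbers number_counts out) := by unfold Spec_get_total_of_similarity; infer_instance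

-- ===== CLAIM (what is proved, stated in full; the proofs are below) =====
def Claim_equal_get_total_of_similarity : Prop := ∀ (list_of_numbers : List Int) (number_counts : List (Int × Int)), Dom_get_total_of_similarity list_of_numbers number_counts → Spec_get_total_of_similarity list_of_numbers number_counts (get_total_of_similarity list_of_numbers number_counts)

-- ===== LEMMAS AND PROOFS =====

-- adding one occurrence of x (x ∈ ks, ks nodup) bumps the grouped sum by f x
theorem pv_group_step (f : Int → Int) (x : Int) (xs : List Int) :
    ∀ (ks : List Int), ks.Nodup → x ∈ ks →
    (ks.map (fun k => ((x :: xs).count k : Int) * f k)).sum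
      = (ks.map (fun k => ((xs.count k : Int)) * f k)).sum + f x := by
  intro ks
  induction ks with
  | nil => intro _ h; cases h
  | cons k ks ih =>
    intro hnd hmem
    simp only [List.nodup_cons] at hnd
    simp only [List.map_cons, List.sum_cons]
    rcases List.mem_cons.mp hmem with h | h
    · subst h
      have : ∀ j ∈ ks, ((x :: xs).count j : Int) * f j = (xs.count j : Int) * f j := by
        intro j hj
        have : j ≠ x := fun e => hnd.1 (e ▸ hj)
        rw [List.count_cons_of_ne (fun e => this e.symm)]
      rw [List.map_congr_left this, List.count_cons_self]
      push_cast; ring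
    · rw [ih hnd.2 h]
      have hkx : k ≠ x := fun e => hnd.1 (e ▸ h)
      rw [List.count_cons_of_ne (fun e => hkx e.symm)]
      ring

-- per-element sum = sum over any nodup covering key list, weighted by counts
theorem pv_group (f : Int → Int) :
    ∀ (xs ks : List Int), ks.Nodup → (∀ n ∈ xs, n ∈ ks) →
    (xs.map f).sum = (ks.map (fun k => ((xs.count k : Int)) * f k)).sum := by
  intro xs
  induction xs with
  | nil => intro ks _ _; simp
  | cons x xs ih =>
    intro ks hnd hcov
    rw [List.map_cons, List.sum_cons,
        pv_group_step f x xs ks hnd (hcov x (List.mem_cons_self)),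
        ih ks hnd (fun n hn => hcov n (List.mem_cons_of_mem _ hn))]
    ring

theorem get_total_of_similarity_eq (xs : List Int) (nc : List (Int × Int)) :
    get_total_of_similarity xs nc = get_total_of_similarity_alt xs nc := by
  unfold get_total_of_similarity get_total_of_similarity_alt pvFreq
  set d := PySem.Dict.ofList nc with hd
  set g : Int → Int := fun n => n * d.getD n 0 with hg
  -- A's fold step is "add g n"
  have hA : (fun (t : Int) (n : Int) =>
      match d.get? n with
      | some c => t + n * c
      | none => t) = fun t n => t + g n := by
    funext t n
    cases h : d.get? n with
    | none => simp [hg, PySem.Dict.getD_eq_get?_getD, h]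
    | some c => simp [hg, PySem.Dict.getD_eq_get?_getD, h]
  rw [hA, PySem.List.foldl_add, PySem.Dict.foldl_insert_getD_add_one_eq_counter,
      PySem.Dict.items_counter, PySem.List.foldl_add]
  simp only [zero_add, List.map_map, Function.comp_def]
  rw [pv_group g xs (PySem.Set.ofList xs) (PySem.Set.nodup_ofList xs)
      (fun n hn => (PySem.Set.mem_ofList xs n).mpr hn)]
  congr 1
  apply List.map_congr_left
  intro k _
  simp [hg]; ring

-- ===== VERDICT (by name: the statement is the Claim_ definition above) =====
theorem get_total_of_similarity_spec : Claim_equal_get_total_of_similarity := by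
  intro xs nc _
  unfold Spec_get_total_of_similarity
  exact get_total_of_similarity_eq xs nc
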